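-- pv_equiv track=rewrite | github.com/tsaanghwang/Yime | tools/validate_yinyuan_source_consistency.py | collect_duplicates
-- ===== SOURCE A (Python) =====
-- from collections import defaultdict
--
-- def collect_duplicates(values: dict[str, str], label: str, source_name: str) -> list[str]:
--     reverse: dict[str, list[str]] = defaultdict(list)
--     for key, value in values.items():
--         reverse[value].append(key)
--
--     issues: list[str] = []
--     for value, keys in sorted(reverse.items()):
--         if len(keys) > 1:
--             issues.append(
--                 f"{source_name}: duplicate {label} {value!r} shared by {', '.join(sorted(keys))}"
--             )
--     return issues
-- ===== SOURCE B (Python) =====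
-- def collect_duplicates(values: dict[str, str], label: str, source_name: str) -> list[str]:
--     items = sorted(values.items(), key=lambda kv: kv[1])
--     issues: list[str] = []
--     i, n = 0, len(items)
--     while i < n:
--         value = items[i][1]
--         j = i
--         while j < n and items[j][1] == value:
--             j += 1
--         if j - i > 1:
--             keys = sorted(k for k, _ in items[i:j])
--             issues.append(
--                 f"{source_name}: duplicate {label} {value!r} shared by {', '.join(keys)}"
--             )
--         i = j
--     return issues
-- ===== Notes on version B (the rewrite author's own statement) =====
-- stated objective: idiomatic
-- what changed: Replaces the defaultdict reverse index plus sort-of-groups with a single sort of the items by value followed by one adjacent-run scan that emits a line per run of length > 1.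
import Mathlib
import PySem

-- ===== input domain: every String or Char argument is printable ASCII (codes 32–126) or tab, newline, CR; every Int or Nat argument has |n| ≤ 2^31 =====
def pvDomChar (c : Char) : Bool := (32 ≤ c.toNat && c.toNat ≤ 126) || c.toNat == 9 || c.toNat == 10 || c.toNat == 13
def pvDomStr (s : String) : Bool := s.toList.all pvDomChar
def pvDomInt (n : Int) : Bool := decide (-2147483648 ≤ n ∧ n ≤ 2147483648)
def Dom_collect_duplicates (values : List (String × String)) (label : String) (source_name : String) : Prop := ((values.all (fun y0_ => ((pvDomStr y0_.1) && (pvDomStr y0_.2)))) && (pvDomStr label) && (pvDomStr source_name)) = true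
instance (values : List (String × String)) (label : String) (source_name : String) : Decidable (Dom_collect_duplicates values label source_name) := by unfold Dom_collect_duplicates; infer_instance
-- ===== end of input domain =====

-- B replaces A's defaultdict reverse index + sort of the groups by one sort of the items by
-- value followed by an adjacent-run scan (objective: idiomatic; same asymptotic cost).

-- Shared helpers: BOTH Pythons format each issue with the identical f-string
-- f"{source_name}: duplicate {label} {value!r} shared by {', '.join(sorted(keys))}",
-- so the repr/format code is one shared transliteration used by both ports.
-- pyReprChar/pyReprStr: Python repr(s) — exact on Dom's character set (printable ASCII, tab, newline, CR):
-- quote is '"' iff s contains "'" and no '"'; backslash, the quote char, tab, newline, CR are escaped.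
def pyReprChar (q c : Char) : List Char :=
  if c = '\\' then ['\\', '\\']
  else if c = q then ['\\', q]
  else if c = '\t' then ['\\', 't']
  else if c = '\n' then ['\\', 'n']
  else if c = '\r' then ['\\', 'r']
  else [c]

def pyReprStr (s : String) : String :=
  let cs := s.toList
  let q : Char := if cs.contains '\'' && !(cs.contains '"') then '"' else '\''
  String.ofList (q :: cs.flatMap (pyReprChar q) ++ [q])

def fmtIssue (source_name label value : String) (keys : List String) : String :=
  source_name ++ ": duplicate " ++ label ++ " " ++ pyReprStr value ++ " shared by " ++
    PySem.Str.join ", " (PySem.List.sorted keys (fun s => s) false)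

-- ===== PORT A =====
-- reverse = defaultdict(list); for key, value in values.items(): reverse[value].append(key)
-- then: for value, keys in sorted(reverse.items()): if len(keys) > 1: append the line.
-- sorted(reverse.items()) compares (value, keys) tuples; the dict's keys (the values) are
-- distinct, so that order is exactly the order of the first component (key = fst).
def collect_duplicates (values : List (String × String)) (label : String) (source_name : String) : List String :=
  let reverse : PySem.Dict String (List String) :=
    values.foldl (fun d kv => d.modify kv.2 [] (fun ks => ks ++ [kv.1])) PySem.Dict.empty
  let sortedItems := PySem.List.sorted reverse.items (fun p => p.1) false
  sortedItems.foldl (fun issues p =>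
    if p.2.length > 1 then issues ++ [fmtIssue source_name label p.1 p.2] else issues) []

-- ===== PORT B =====
-- the inner `while j < n and items[j][1] == value: j += 1` scan: the run is the takeWhile
-- prefix, the loop then continues at i = j, i.e. on the dropWhile suffix.
def groupRuns : List (String × String) → List (String × List String)
  | [] => []
  | (k, v) :: rest =>
    (v, k :: (rest.takeWhile (fun p => p.2 == v)).map (fun p => p.1)) ::
      groupRuns (rest.dropWhile (fun p => p.2 == v))
termination_by l => l.length
decreasing_by
  simp only [List.length_cons]
  exact Nat.lt_succ_of_le (List.length_dropWhile_le _ _)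

def collect_duplicates_alt (values : List (String × String)) (label : String) (source_name : String) : List String :=
  let items := PySem.List.sorted values (fun kv => kv.2) false
  (groupRuns items).foldl (fun issues g =>
    if g.2.length > 1 then issues ++ [fmtIssue source_name label g.1 g.2] else issues) []

-- ===== PRECONDITION & SPEC =====
def Spec_collect_duplicates (values : List (String × String)) (label : String) (source_name : String) (out : List String) : Prop := out = collect_duplicates_alt values label source_name
instance (values : List (String × String)) (label : String) (source_name : String) (out : List String) : Decidable (Spec_collect_duplicates values label source_name out) := by unfold Spec_collect_duplicates; infer_instance

-- ===== CLAIM (what is proved, stated in full; the proofs are below) =====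
def Claim_equal_collect_duplicates : Prop := ∀ (values : List (String × String)) (label : String) (source_name : String), Dom_collect_duplicates values label source_name → Spec_collect_duplicates values label source_name (collect_duplicates values label source_name)

-- ===== LEMMAS AND PROOFS =====

theorem filter_insertBy {α κ : Type} [LinearOrder κ] [BEq κ] [LawfulBEq κ]
    (key : α → κ) (v : κ) (x : α) (acc : List α)
    (h : acc.Pairwise (fun a b => key a ≤ key b)) :
    (PySem.List.insertBy (fun a b => decide (key a < key b)) x acc).filter (fun a => key a == v)
      = acc.filter (fun a => key a == v) ++ if key x == v then [x] else [] := by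
  induction acc with
  | nil => simp [PySem.List.insertBy, List.filter]; split <;> simp_all
  | cons y ys ih =>
    rw [List.pairwise_cons] at h
    obtain ⟨hy, hys⟩ := h
    by_cases hlt : key x < key y
    · simp only [PySem.List.insertBy, hlt, decide_true, if_true]
      by_cases hxv : key x == v
      · have hxv' : key x = v := by simpa using hxv
        have : ∀ a ∈ y :: ys, ¬ (key a == v) := by
          intro a ha
          have : key y ≤ key a := by
            rcases List.mem_cons.mp ha with rfl | ha'
            · exact le_refl _
            · exact hy a ha'
          have : v < key a := lt_of_lt_of_le (hxv' ▸ hlt) this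
          simp [ne_of_gt this]
        rw [List.filter_cons_of_pos (by simpa using hxv)]
        rw [List.filter_eq_nil_iff.mpr (by intro a ha; simpa using this a ha)]
        simp [hxv]
      · simp only [hxv, Bool.false_eq_true, if_false]
        rw [List.filter_cons_of_neg (by simpa using hxv)]
        simp
    · simp only [PySem.List.insertBy, hlt, decide_false, Bool.false_eq_true, if_false]
      by_cases hyv : key y == v
      · rw [List.filter_cons_of_pos (by simpa using hyv), List.filter_cons_of_pos (by simpa using hyv)]
        rw [ih hys]; simp
      · rw [List.filter_cons_of_neg (by simpa using hyv), List.filter_cons_of_neg (by simpa using hyv)]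
        exact ih hys

theorem filter_sorted {α κ : Type} [LinearOrder κ] [BEq κ] [LawfulBEq κ]
    (xs : List α) (key : α → κ) (v : κ) :
    (PySem.List.sorted xs key false).filter (fun a => key a == v)
      = xs.filter (fun a => key a == v) := by
  induction xs using List.reverseRecOn with
  | nil => rfl
  | append_singleton xs x ih =>
    rw [PySem.List.sorted_eq_foldl_insertBy, List.foldl_append, List.foldl_cons, List.foldl_nil,
        ← PySem.List.sorted_eq_foldl_insertBy]
    rw [filter_insertBy key v x _ (PySem.List.sorted_pairwise xs key), ih]
    rw [List.filter_append]
    congr 1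
    by_cases hx : key x = v
    · simp [List.filter, hx]
    · have hb : (key x == v) = false := by simp [hx]
      simp [List.filter, hb]

theorem cons_foldl_add {κ : Type} [BEq κ] [LawfulBEq κ] (l : List κ) (s : List κ) (a : κ) (h : a ∉ l) :
    l.foldl PySem.Set.add (a :: s) = a :: l.foldl PySem.Set.add s := by
  induction l generalizing s with
  | nil => rfl
  | cons x xs ih =>
    have hxa : x ≠ a := fun e => h (e ▸ List.mem_cons_self)
    have h' : a ∉ xs := fun e => h (List.mem_cons_of_mem _ e)
    simp only [List.foldl_cons]
    have : PySem.Set.add (a :: s) x = a :: PySem.Set.add s x := by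
      simp only [PySem.Set.add, PySem.Set.contains, List.contains_cons]
      have : (x == a) = false := by simp [hxa]
      rw [this]
      simp only [Bool.false_or]
      split <;> simp
    rw [this, ih _ h']

theorem ofList_run_cons {κ : Type} [BEq κ] [LawfulBEq κ] (l₁ l₂ : List κ) (a : κ)
    (h1 : ∀ x ∈ l₁, x = a) (h2 : a ∉ l₂) :
    PySem.Set.ofList (a :: (l₁ ++ l₂)) = a :: PySem.Set.ofList l₂ := by
  rw [PySem.Set.ofList_eq_foldl, PySem.Set.ofList_eq_foldl]
  have h0 : PySem.Set.add ([] : List κ) a = [a] := by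
    simp [PySem.Set.add, PySem.Set.contains]
  rw [List.foldl_cons, h0, List.foldl_append]
  have hcollapse : l₁.foldl PySem.Set.add [a] = [a] := by
    induction l₁ with
    | nil => rfl
    | cons x xs ih =>
      have hx : x = a := h1 x List.mem_cons_self
      have : PySem.Set.add [a] x = [a] := by
        simp [PySem.Set.add, PySem.Set.contains, hx]
      rw [List.foldl_cons, this]
      exact ih (fun y hy => h1 y (List.mem_cons_of_mem _ hy))
  rw [hcollapse]
  exact cons_foldl_add l₂ [] a h2

theorem groupRuns_char (L : List (String × String)) (h : L.Pairwise (fun a b => a.2 ≤ b.2)) :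
    groupRuns L = (PySem.Set.ofList (L.map (fun p => p.2))).map
      (fun v => (v, (L.filter (fun p => p.2 == v)).map (fun p => p.1))) := by
  induction L using groupRuns.induct with
  | case1 => simp [groupRuns, PySem.Set.ofList]
  | case2 k v rest ih =>
    rw [List.pairwise_cons] at h
    obtain ⟨hhead, htail⟩ := h
    have hrunv : ∀ p ∈ rest.takeWhile (fun p => p.2 == v), p.2 = v := by
      intro p hp
      simpa using List.mem_takeWhile_imp hp
    have hrest'ne : ∀ p ∈ rest.dropWhile (fun p => p.2 == v), p.2 ≠ v := by
      cases hr : rest.dropWhile (fun p => p.2 == v) with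
      | nil => simp
      | cons q t =>
        have hne : rest.dropWhile (fun p => p.2 == v) ≠ [] := by simp [hr]
        have h0 := List.head_dropWhile_not (fun p : String × String => p.2 == v) hne
        simp only [hr, List.head_cons] at h0
        have hqv : q.2 ≠ v := by simpa using h0
        have hqrest : q ∈ rest :=
          (List.dropWhile_sublist (fun p => p.2 == v)).mem (by rw [hr]; exact List.mem_cons_self)
        have hvltq : v < q.2 := lt_of_le_of_ne (hhead q hqrest) (Ne.symm hqv)
        have hsub : (q :: t).Pairwise (fun a b => a.2 ≤ b.2) := by
          have := htail.sublist (List.dropWhile_sublist (fun p => p.2 == v))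
          rwa [hr] at this
        intro p hp
        rcases List.mem_cons.mp hp with rfl | hpt
        · exact hqv
        · have hqp : q.2 ≤ p.2 := (List.pairwise_cons.mp hsub).1 p hpt
          exact fun e => absurd (lt_of_lt_of_le hvltq hqp) (by simp [e])
    have hsplit : rest.takeWhile (fun p => p.2 == v) ++ rest.dropWhile (fun p => p.2 == v) = rest :=
      List.takeWhile_append_dropWhile
    have hofList : PySem.Set.ofList (((k, v) :: rest).map (fun p => p.2))
        = v :: PySem.Set.ofList ((rest.dropWhile (fun p => p.2 == v)).map (fun p => p.2)) := by
      have hvals : (((k, v) :: rest).map (fun p => p.2))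
          = v :: ((rest.takeWhile (fun p => p.2 == v)).map (fun p => p.2)
              ++ (rest.dropWhile (fun p => p.2 == v)).map (fun p => p.2)) := by
        simp only [List.map_cons]
        rw [← List.map_append, hsplit]
      rw [hvals]
      exact ofList_run_cons _ _ v
        (by intro x hx; obtain ⟨p, hp, rfl⟩ := List.mem_map.mp hx; exact hrunv p hp)
        (by intro hx; obtain ⟨p, hp, he⟩ := List.mem_map.mp hx; exact hrest'ne p hp he)
    have hfiltv : (((k, v) :: rest).filter (fun p => p.2 == v))
        = (k, v) :: rest.takeWhile (fun p => p.2 == v) := by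
      rw [List.filter_cons_of_pos (by simp), ← hsplit, List.filter_append]
      rw [List.filter_eq_self.mpr (by intro p hp; simp [hrunv p hp])]
      rw [List.filter_eq_nil_iff.mpr (by intro p hp; simp [hrest'ne p hp])]
      simp
    have hfiltw : ∀ w, w ≠ v → (((k, v) :: rest).filter (fun p => p.2 == w))
        = (rest.dropWhile (fun p => p.2 == v)).filter (fun p => p.2 == w) := by
      intro w hw
      rw [List.filter_cons_of_neg (by simp [Ne.symm hw]), ← hsplit, List.filter_append]
      rw [List.filter_eq_nil_iff.mpr (by intro p hp; simp [hrunv p hp, Ne.symm hw])]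
      simp
    rw [groupRuns, hofList, List.map_cons]
    congr 1
    · rw [hfiltv]; simp
    · have htail' : (rest.dropWhile (fun p => p.2 == v)).Pairwise (fun a b => a.2 ≤ b.2) :=
        htail.sublist (List.dropWhile_sublist _)
      rw [ih htail']
      apply List.map_congr_left
      intro w hw
      have hwmem : w ∈ (rest.dropWhile (fun p => p.2 == v)).map (fun p => p.2) :=
        (PySem.Set.mem_ofList _ _).mp hw
      obtain ⟨p, hp, rfl⟩ := List.mem_map.mp hwmem
      rw [hfiltw p.2 (hrest'ne p hp)]

theorem items_reverse (vs : List (String × String)) :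
    (vs.foldl (fun d kv => d.modify kv.2 [] (fun ks => ks ++ [kv.1])) PySem.Dict.empty).items
      = (PySem.Set.ofList (vs.map (fun p => p.2))).map
          (fun v => (v, (vs.filter (fun p => p.2 == v)).map (fun p => p.1))) := by
  have hkeys : (vs.foldl (fun d kv => d.modify kv.2 [] (fun ks => ks ++ [kv.1])) PySem.Dict.empty).keys
      = PySem.Set.ofList (vs.map (fun p => p.2)) := by
    have := PySem.Dict.keys_foldl_modify_key vs (fun p : String × String => p.2) ([] : List String)
      (fun _ kv => fun ks => ks ++ [kv.1]) PySem.Dict.empty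
    simpa [PySem.Dict.keys_empty, PySem.Set.ofList_eq_foldl, PySem.Set.update] using this
  have hnodup : (vs.foldl (fun d kv => d.modify kv.2 [] (fun ks => ks ++ [kv.1])) PySem.Dict.empty).keys.Nodup :=
    PySem.Dict.nodup_keys_foldl_modify_key vs (fun p : String × String => p.2) ([] : List String)
      (fun _ kv => fun ks => ks ++ [kv.1]) PySem.Dict.empty (by simp [PySem.Dict.keys_empty])
  rw [PySem.Dict.items_eq_map_keys _ hnodup ([] : List String), hkeys]
  apply List.map_congr_left
  intro v _
  congr 1
  have hswap : vs.foldl (fun d kv => d.modify kv.2 [] (fun ks => ks ++ [kv.1])) PySem.Dict.empty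
      = (vs.map (fun p => (p.2, p.1))).foldl (fun d p => d.modify p.1 [] (fun ks => ks ++ [p.2])) PySem.Dict.empty := by
    rw [List.foldl_map]
  rw [hswap, PySem.Dict.getD_foldl_modify_append]
  simp [List.filter_map, Function.comp_def]

theorem foldl_add_sublist {κ : Type} [BEq κ] (l s : List κ) :
    (l.foldl PySem.Set.add s).Sublist (s ++ l) := by
  induction l generalizing s with
  | nil => simp
  | cons x xs ih =>
    rw [List.foldl_cons]
    have h1 : (PySem.Set.add s x).Sublist (s ++ [x]) := by
      simp only [PySem.Set.add]
      split
      · exact (List.sublist_append_left s [x]).trans (List.Sublist.refl _)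
      · exact List.Sublist.refl _
    have h2 : (xs.foldl PySem.Set.add (PySem.Set.add s x)).Sublist ((PySem.Set.add s x) ++ xs) := ih _
    have h3 : ((PySem.Set.add s x) ++ xs).Sublist ((s ++ [x]) ++ xs) := h1.append_right xs
    simpa [List.append_assoc] using h2.trans h3

theorem ofList_sublist {κ : Type} [BEq κ] (l : List κ) :
    (PySem.Set.ofList l).Sublist l := by
  have := foldl_add_sublist l ([] : List κ)
  simpa [PySem.Set.ofList_eq_foldl] using this

theorem ofList_sorted_vals (vs : List (String × String)) :
    PySem.Set.ofList ((PySem.List.sorted vs (fun kv => kv.2) false).map (fun p => p.2))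
      = PySem.List.sorted (PySem.Set.ofList (vs.map (fun p => p.2))) (fun x => x) false := by
  apply Eq.symm
  apply PySem.List.sorted_eq_of_perm_of_pairwise_lt
  · -- Perm
    rw [List.perm_ext_iff_of_nodup (PySem.Set.nodup_ofList _) (PySem.Set.nodup_ofList _)]
    intro a
    rw [PySem.Set.mem_ofList, PySem.Set.mem_ofList]
    constructor
    · intro ha
      obtain ⟨p, hp, rfl⟩ := List.mem_map.mp ha
      exact List.mem_map_of_mem ((PySem.List.sorted_perm vs _ false).mem_iff.mp hp)
    · intro ha
      obtain ⟨p, hp, rfl⟩ := List.mem_map.mp ha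
      exact List.mem_map_of_mem ((PySem.List.sorted_perm vs _ false).mem_iff.mpr hp)
  · -- Pairwise <
    have hle : ((PySem.List.sorted vs (fun kv => kv.2) false).map (fun p => p.2)).Pairwise (fun a b => a ≤ b) :=
      PySem.List.sorted_map_key_pairwise vs (fun kv => kv.2)
    have hle' := hle.sublist (ofList_sublist _)
    have hne : (PySem.Set.ofList ((PySem.List.sorted vs (fun kv => kv.2) false).map (fun p => p.2))).Pairwise (fun a b => a ≠ b) :=
      PySem.Set.nodup_ofList _
    exact (hle'.and hne).imp (fun h => lt_of_le_of_ne h.1 h.2)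

theorem main_eq (vs : List (String × String)) :
    PySem.List.sorted
        (vs.foldl (fun d kv => d.modify kv.2 [] (fun ks => ks ++ [kv.1])) PySem.Dict.empty).items
        (fun p => p.1) false
      = groupRuns (PySem.List.sorted vs (fun kv => kv.2) false) := by
  rw [groupRuns_char _ (PySem.List.sorted_pairwise vs (fun kv => kv.2)), ofList_sorted_vals]
  simp only [filter_sorted]
  rw [items_reverse]
  apply PySem.List.sorted_eq_of_perm_of_pairwise_lt
  · exact ((PySem.List.sorted_perm (PySem.Set.ofList (vs.map (fun p => p.2))) (fun x => x) false).map _)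
  · rw [List.pairwise_map]
    exact PySem.List.sorted_ofList_pairwise_lt _

-- ===== VERDICT (by name: the statement is the Claim_ definition above) =====
theorem collect_duplicates_spec : Claim_equal_collect_duplicates := by
  intro values label source_name _
  unfold Spec_collect_duplicates collect_duplicates collect_duplicates_alt
  dsimp only
  rw [main_eq]
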